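-- pv_equiv track=rewrite | github.com/zc0718/req1 | conanfile.py | _get_export_objects
-- ===== SOURCE A (Python) =====
-- from typing import Literal
--
-- def _get_export_objects(x: list[str], tag: Literal['@exporter', '@attacher'] = '@exporter') -> list[str]:
--     _cache = (''.join(x)).split('\n\n')  # TODO: maybe \n*3 is better (consider the namespace in CPP)?
--     _export_objs = [_ for _ in _cache if tag in _]
--
--     container = []
--     for _obj in _export_objs:
--         _obj = [_ for _ in _obj.split('\n') if _ != '']
--         _res, _ptr = [_ for _ in _obj], False
--         for i, (_v1, _v2) in enumerate(zip(_obj, _res)):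
--             if _v1.startswith(f' * {tag}'):
--                 _ptr = True
--             if _v1.startswith(' */') and _ptr:
--                 _res[i] = _v2 + '\nexport '
--                 _ptr = False
--         _res = '\n'.join([_ for _ in _res if not _.startswith(f' * {tag}')])
--         if tag == '@exporter':
--             _res = _res.replace('export \n','export ')
--         else:  # @attacher
--             _res = _res.replace('export \n', '')
--         container.append(_res)
--
--     return container
-- ===== SOURCE B (Python) =====
-- def _get_export_objects(x: list[str], tag: str = '@exporter') -> list[str]:
--     tag_prefix = ' * ' + tag
--     exporter = tag == '@exporter'
--     out = []
--     for blk in ''.join(x).split('\n\n'):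
--         if tag in blk:
--             # one pass over the non-empty lines: skip tag lines, and after a
--             # ' */' close line that follows a tag line emit an 'export ' marker piece
--             pieces, armed = [], False
--             for line in blk.split('\n'):
--                 if line == '':
--                     continue
--                 if line.startswith(tag_prefix):
--                     armed = True
--                 elif line.startswith(' */') and armed:
--                     pieces += [line, 'export ']
--                     armed = False
--                 else:
--                     pieces.append(line)
--             # glue the pieces: a non-final piece ending in 'export ' merges with the
--             # next piece (kept for @exporter, dropped for any other tag)
--             n = len(pieces)
--             res = ''
--             for i, p in enumerate(pieces):
--                 if i + 1 == n:
--                     res += p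
--                 elif p.endswith('export '):
--                     res += p if exporter else p[:-7]
--                 else:
--                     res += p + '\n'
--             out.append(res)
--     return out
-- ===== Notes on version B (the rewrite author's own statement) =====
-- stated objective: alternative
-- what changed: Per block, B makes one pass over the lines with an armed flag (skipping tag lines and emitting an 'export ' marker piece after a marked ' */' line) and then glues the pieces locally, merging a non-final piece that ends in 'export ' with its successor, instead of A's copy + enumerate/zip in-place mutation, post-hoc filter, '\n'-join and global str.replace('export \n', ...).
import Mathlib
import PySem

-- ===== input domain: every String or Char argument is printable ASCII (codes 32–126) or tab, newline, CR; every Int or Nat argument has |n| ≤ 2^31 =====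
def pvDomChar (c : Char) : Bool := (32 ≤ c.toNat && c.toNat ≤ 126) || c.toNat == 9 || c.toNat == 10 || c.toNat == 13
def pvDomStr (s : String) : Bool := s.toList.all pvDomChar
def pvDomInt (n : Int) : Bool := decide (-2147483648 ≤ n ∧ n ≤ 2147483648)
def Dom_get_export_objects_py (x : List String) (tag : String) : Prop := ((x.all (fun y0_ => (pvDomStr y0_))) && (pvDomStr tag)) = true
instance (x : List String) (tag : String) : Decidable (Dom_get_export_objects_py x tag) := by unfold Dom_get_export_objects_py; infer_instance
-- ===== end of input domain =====

-- B replaces A's per-block copy + enumerate/zip in-place marking + post-filter + '\n'-join +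
-- global replace('export \n', …) with one pass over the lines (armed flag, marker pieces) and a
-- local glue step that merges a non-final piece ending in 'export ' with its successor: an
-- alternative decomposition of the same task, equal on every input.

-- ===== PORT A =====
def get_export_objects_py (x : List String) (tag : String) : List String :=
  -- _cache = (''.join(x)).split('\n\n')
  let cache := PySem.Chars.splitOn (PySem.Chars.join [] (x.map String.toList)) ['\n', '\n']
  -- _export_objs = [_ for _ in _cache if tag in _]
  let exportObjs := cache.filter (fun b => PySem.Chars.isIn tag.toList b)
  -- for _obj in _export_objs: … container.append(_res)
  exportObjs.foldl (fun container obj =>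
    -- _obj = [_ for _ in _obj.split('\n') if _ != '']
    let objL := (PySem.Chars.splitOn obj ['\n']).filter (fun l => !decide (l = []))
    -- _res, _ptr = [_ for _ in _obj], False
    let res0 := objL.map (fun l => l)
    -- for i, (_v1, _v2) in enumerate(zip(_obj, _res)): …   (zip pairs are read before the
    -- in-place write at the same index, so the pair list is the initial zip)
    let st := (PySem.List.enumerate (objL.zip res0)).foldl
      (fun (st : List (List Char) × Bool) iv =>
        let ptr := if PySem.Chars.startswith iv.2.1 (' ' :: '*' :: ' ' :: tag.toList) then true else st.2
        if PySem.Chars.startswith iv.2.1 [' ', '*', '/'] && ptr then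
          (st.1.set iv.1.toNat (iv.2.2 ++ '\n' :: "export ".toList), false)
        else (st.1, ptr)) (res0, false)
    -- _res = '\n'.join([_ for _ in _res if not _.startswith(f' * {tag}')])
    let resJ := PySem.Chars.join ['\n']
      (st.1.filter (fun l => !PySem.Chars.startswith l (' ' :: '*' :: ' ' :: tag.toList)))
    -- _res = _res.replace('export \n', 'export ' / '')
    let resF := if tag == "@exporter"
      then PySem.Chars.replace resJ ("export \n".toList) ("export ".toList)
      else PySem.Chars.replace resJ ("export \n".toList) []
    container ++ [String.ofList resF]) []

-- ===== PORT B =====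
def get_export_objects_py_alt (x : List String) (tag : String) : List String :=
  let tagPrefix := ' ' :: '*' :: ' ' :: tag.toList
  let exporter := tag == "@exporter"
  (PySem.Chars.splitOn (PySem.Chars.join [] (x.map String.toList)) ['\n', '\n']).foldl
    (fun out blk =>
      if PySem.Chars.isIn tag.toList blk then
        -- one pass: skip empty and tag lines, emit an 'export ' marker piece after a
        -- ' */' line that follows a tag line
        let pa := (PySem.Chars.splitOn blk ['\n']).foldl
          (fun (pa : List (List Char) × Bool) line =>
            if line = [] then pa
            else if PySem.Chars.startswith line tagPrefix then (pa.1, true)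
            else if PySem.Chars.startswith line [' ', '*', '/'] && pa.2 then
              (pa.1 ++ [line, "export ".toList], false)
            else (pa.1 ++ [line], pa.2)) ([], false)
        let n := pa.1.length
        -- glue: a non-final piece ending in 'export ' merges with its successor
        let res := (PySem.List.enumerate pa.1).foldl
          (fun res ip =>
            if ip.1 + 1 = (n : Int) then res ++ ip.2
            else if PySem.Chars.endswith ip.2 ("export ".toList) then
              -- p[:-7]: the guard gives 7 ≤ p.length, where the slice is List.take (length - 7)
              res ++ (if exporter then ip.2 else ip.2.take (ip.2.length - 7))
            else res ++ ip.2 ++ ['\n']) []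
        out ++ [String.ofList res]
      else out) []

-- ===== PRECONDITION & SPEC =====
def Spec_get_export_objects_py (x : List String) (tag : String) (out : List String) : Prop := out = get_export_objects_py_alt x tag
instance (x : List String) (tag : String) (out : List String) : Decidable (Spec_get_export_objects_py x tag out) := by unfold Spec_get_export_objects_py; infer_instance

-- ===== CLAIM (what is proved, stated in full; the proofs are below) =====
def Claim_equal_get_export_objects_py : Prop := ∀ (x : List String) (tag : String), Dom_get_export_objects_py x tag → Spec_get_export_objects_py x tag (get_export_objects_py x tag)

-- ===== LEMMAS AND PROOFS =====

-- 'export ' and 'export \n'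
def pvW : List Char := "export ".toList
def pvNlW : List Char := "export \n".toList

-- A's marking loop, as structural recursion (elements kept in place, close lines marked)
def pvMarkRec (tagL : List Char) : List (List Char) → Bool → List (List Char)
  | [], _ => []
  | l :: t, b =>
    let b' := if PySem.Chars.startswith l (' ' :: '*' :: ' ' :: tagL) then true else b
    if PySem.Chars.startswith l [' ', '*', '/'] && b' then
      (l ++ '\n' :: pvW) :: pvMarkRec tagL t false
    else l :: pvMarkRec tagL t b'

-- A's marking loop followed by the tag-line filter (marked close line stays one element)
def pvCombineRec (tagL : List Char) : List (List Char) → Bool → List (List Char)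
  | [], _ => []
  | l :: t, b =>
    if PySem.Chars.startswith l (' ' :: '*' :: ' ' :: tagL) then pvCombineRec tagL t true
    else if PySem.Chars.startswith l [' ', '*', '/'] && b then
      (l ++ '\n' :: pvW) :: pvCombineRec tagL t false
    else l :: pvCombineRec tagL t b

-- B's piece builder (marker is its own piece)
def pvPiecesRec (tagL : List Char) : List (List Char) → Bool → List (List Char)
  | [], _ => []
  | l :: t, b =>
    if PySem.Chars.startswith l (' ' :: '*' :: ' ' :: tagL) then pvPiecesRec tagL t true
    else if PySem.Chars.startswith l [' ', '*', '/'] && b then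
      l :: pvW :: pvPiecesRec tagL t false
    else l :: pvPiecesRec tagL t b

-- fuel-free scan equal to PySem.Chars.replace s pvNlW new
def pvRepEx (new : List Char) : List Char → List Char
  | [] => []
  | c :: t =>
    if pvNlW.isPrefixOf (c :: t) then new ++ pvRepEx new (t.drop 7)
    else c :: pvRepEx new t
termination_by l => l.length
decreasing_by all_goals simp

-- the glue step (general replacement text)
def pvStage (new : List Char) : List (List Char) → List Char
  | [] => []
  | [p] => p
  | p :: q :: t =>
    (if pvW.isSuffixOf p then p.take (p.length - 7) ++ new else p ++ ['\n']) ++ pvStage new (q :: t)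

-- the glue step as B computes it
def pvStageB (exporter : Bool) : List (List Char) → List Char
  | [] => []
  | [p] => p
  | p :: q :: t =>
    (if pvW.isSuffixOf p then (if exporter then p else p.take (p.length - 7)) else p ++ ['\n'])
      ++ pvStageB exporter (q :: t)


theorem pv_close_not_tagline (tagL l : List Char)
    (h : PySem.Chars.startswith l [' ', '*', '/'] = true) :
    PySem.Chars.startswith l (' ' :: '*' :: ' ' :: tagL) = false := by
  simp only [PySem.Chars.startswith, List.isPrefixOf_iff_prefix] at h
  obtain ⟨r, rfl⟩ := h
  simp [PySem.Chars.startswith, List.isPrefixOf]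

theorem pv_marked_not_tagline (tagL l m : List Char)
    (h : PySem.Chars.startswith l [' ', '*', '/'] = true) :
    PySem.Chars.startswith (l ++ m) (' ' :: '*' :: ' ' :: tagL) = false := by
  simp only [PySem.Chars.startswith, List.isPrefixOf_iff_prefix] at h
  obtain ⟨r, rfl⟩ := h
  simp [PySem.Chars.startswith, List.isPrefixOf]








theorem pv_filter_markRec (tagL : List Char) (l : List (List Char)) (b : Bool) :
    (pvMarkRec tagL l b).filter
      (fun l => !PySem.Chars.startswith l (' ' :: '*' :: ' ' :: tagL)) = pvCombineRec tagL l b := by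
  induction l generalizing b with
  | nil => rfl
  | cons a t ih =>
    by_cases htag : PySem.Chars.startswith a (' ' :: '*' :: ' ' :: tagL) = true
    · have hcl : PySem.Chars.startswith a [' ', '*', '/'] = false := by
        by_contra h
        rw [Bool.not_eq_false] at h
        exact absurd htag (by simp [pv_close_not_tagline tagL a h])
      simp [pvMarkRec, pvCombineRec, htag, hcl, ih]
    · rw [Bool.not_eq_true] at htag
      by_cases hcl : PySem.Chars.startswith a [' ', '*', '/'] = true
      · cases b with
        | true =>
          simp [pvMarkRec, pvCombineRec, htag, hcl,
            pv_marked_not_tagline tagL a _ hcl, ih]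
        | false =>
          simp [pvMarkRec, pvCombineRec, htag, hcl, ih]
      · rw [Bool.not_eq_true] at hcl
        simp [pvMarkRec, pvCombineRec, htag, hcl, ih]

theorem pv_flatMap_combine_pieces (tagL : List Char) (l : List (List Char)) (b : Bool) :
    (pvCombineRec tagL l b).flatMap (fun p => '\n' :: p)
      = (pvPiecesRec tagL l b).flatMap (fun p => '\n' :: p) := by
  induction l generalizing b with
  | nil => rfl
  | cons a t ih =>
    simp only [pvCombineRec, pvPiecesRec]
    split_ifs with h1 h2
    · exact ih true
    · simp [ih false]
    · simp [ih b]



theorem pv_take_append_of_suffix (p : List Char) (h : pvW.isSuffixOf p = true) :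
    p.take (p.length - 7) ++ pvW = p := by
  rw [List.isSuffixOf_iff_suffix] at h
  obtain ⟨q, rfl⟩ := h
  have : (q ++ pvW).length - 7 = q.length := by simp [pvW]
  rw [this, List.take_left]

theorem pv_stageB_eq_stage (exporter : Bool) (pieces : List (List Char)) :
    pvStageB exporter pieces = pvStage (if exporter then pvW else []) pieces := by
  induction pieces with
  | nil => rfl
  | cons p t ih =>
    cases t with
    | nil => rfl
    | cons q r =>
      simp only [pvStageB, pvStage, ih]
      congr 1
      by_cases h : pvW.isSuffixOf p = true
      · simp only [h, if_true]
        cases exporter <;> simp [pv_take_append_of_suffix p h]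
      · simp [h]

theorem pv_pieces_mem (tagL : List Char) (lines : List (List Char)) (b : Bool) (p : List Char)
    (h : p ∈ pvPiecesRec tagL lines b) : p ∈ lines ∨ p = pvW := by
  induction lines generalizing b with
  | nil => simp [pvPiecesRec] at h
  | cons a t ih =>
    simp only [pvPiecesRec] at h
    split_ifs at h with h1 h2
    · rcases ih true h with h' | h'
      · exact Or.inl (List.mem_cons_of_mem a h')
      · exact Or.inr h'
    · rcases List.mem_cons.1 h with rfl | h'
      · exact Or.inl List.mem_cons_self
      · rcases List.mem_cons.1 h' with rfl | h''
        · exact Or.inr rfl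
        · rcases ih false h'' with h3 | h3
          · exact Or.inl (List.mem_cons_of_mem a h3)
          · exact Or.inr h3
    · rcases List.mem_cons.1 h with rfl | h'
      · exact Or.inl List.mem_cons_self
      · rcases ih b h' with h3 | h3
        · exact Or.inl (List.mem_cons_of_mem a h3)
        · exact Or.inr h3





theorem pv_join_eq_drop_flatMap (xs : List (List Char)) :
    PySem.Chars.join ['\n'] xs = (xs.flatMap (fun p => '\n' :: p)).drop 1 := by
  induction xs with
  | nil => simp [PySem.Chars.join_nil]
  | cons a t ih =>
    cases t with
    | nil => simp [PySem.Chars.join_singleton]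
    | cons q r =>
      rw [PySem.Chars.join_cons_cons, ih]
      simp

theorem pv_replace_eq_repEx (s new : List Char) :
    PySem.Chars.replace s pvNlW new = pvRepEx new s := by
  have go : ∀ fuel (l acc : List Char), l.length ≤ fuel →
      PySem.Chars.replace.go pvNlW new fuel l acc = acc.reverse ++ pvRepEx new l := by
    intro fuel
    induction fuel with
    | zero =>
      intro l acc h
      have : l = [] := List.length_eq_zero_iff.mp (Nat.le_zero.mp h)
      subst this
      simp [PySem.Chars.replace.go, pvRepEx]
    | succ n ih =>
      intro l acc h
      cases l with
      | nil => simp [PySem.Chars.replace.go, pvRepEx]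
      | cons c t =>
        rw [PySem.Chars.replace.go]
        by_cases hp : pvNlW.isPrefixOf (c :: t) = true
        · rw [if_pos hp]
          rw [ih _ _ (by simp [pvNlW] at h ⊢; omega)]
          rw [pvRepEx, if_pos hp]
          simp [pvNlW]
        · rw [if_neg hp, ih _ _ (by simp at h ⊢; omega)]
          rw [pvRepEx, if_neg hp]
          simp
  rw [PySem.Chars.replace]
  rw [if_neg (by simp [pvNlW])]
  exact go _ _ _ (le_refl _)






theorem pv_prefix_nlW (p l : List Char) (h : '\n' ∉ p) :
    pvNlW.isPrefixOf (p ++ '\n' :: l) = true ↔ p = pvW := by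
  constructor
  · intro hp
    rw [List.isPrefixOf_iff_prefix] at hp
    obtain ⟨r, hr⟩ := hp
    rcases Nat.lt_trichotomy p.length 7 with hn | hn | hn
    · exfalso
      have h1 : (p ++ '\n' :: l)[p.length]? = some '\n' := by
        rw [List.getElem?_append_right (le_refl _)]
        simp
      rw [← hr] at h1
      have h2 : (pvNlW ++ r)[p.length]? = pvNlW[p.length]? :=
        List.getElem?_append_left (by simp [pvNlW]; omega)
      rw [h2] at h1
      set n := p.length with hdef
      interval_cases n <;> simp [pvNlW] at h1
    · have h1 : p = (p ++ '\n' :: l).take 7 := by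
        rw [← hn, List.take_left]
      rw [← hr] at h1
      rw [List.take_append_of_le_length (by simp [pvNlW])] at h1
      rw [h1]; rfl
    · exfalso
      have h1 : (p ++ '\n' :: l)[7]? = p[7]? :=
        List.getElem?_append_left (by omega)
      rw [← hr] at h1
      have h2 : (pvNlW ++ r)[7]? = pvNlW[7]? :=
        List.getElem?_append_left (by simp [pvNlW])
      rw [h2] at h1
      have h3 : pvNlW[7]? = some '\n' := by rfl
      rw [h3] at h1
      have : '\n' ∈ p := List.mem_of_getElem? h1.symm
      exact h this
  · intro hp
    subst hp
    rw [List.isPrefixOf_iff_prefix]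
    exact ⟨l, rfl⟩

theorem pv_repEx_piece (new p l : List Char) (h : '\n' ∉ p) :
    pvRepEx new (p ++ '\n' :: l)
      = (if pvW.isSuffixOf p then p.take (p.length - 7) ++ new else p ++ ['\n'])
        ++ pvRepEx new l := by
  revert h
  induction p with
  | nil =>
    intro h
    rw [List.nil_append, pvRepEx, if_neg (by simp [pvNlW, List.isPrefixOf])]
    rw [if_neg (by simp [List.isSuffixOf, pvW])]
    simp
  | cons c t ih =>
    intro h
    have hnt : '\n' ∉ t := fun hm => h (List.mem_cons_of_mem c hm)
    have hstep : (c :: t) ++ '\n' :: l = c :: (t ++ '\n' :: l) := by simp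
    by_cases hp : pvNlW.isPrefixOf ((c :: t) ++ '\n' :: l) = true
    · have hpe : c :: t = pvW := (pv_prefix_nlW (c :: t) l h).mp hp
      rw [hstep] at hp
      rw [hstep, pvRepEx, if_pos hp]
      have ht6 : t.length = 6 := by
        have := congrArg List.length hpe; simp [pvW] at this; omega
      have hdrop : (t ++ '\n' :: l).drop 7 = l := by
        rw [List.drop_append, List.drop_of_length_le (by omega), ht6]
        simp
      have hsuf : pvW.isSuffixOf (c :: t) = true := by
        rw [hpe, List.isSuffixOf_iff_suffix]
      have htake : (c :: t).take ((c :: t).length - 7) = [] := by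
        simp [ht6]
      rw [hdrop, if_pos hsuf, htake]
      simp
    · rw [hstep] at hp
      rw [hstep, pvRepEx, if_neg hp, ih hnt]
      by_cases hs : pvW.isSuffixOf (c :: t) = true
      · rw [List.isSuffixOf_iff_suffix, List.suffix_cons_iff] at hs
        rcases hs with hs | hs
        · exfalso
          apply hp
          rw [List.isPrefixOf_iff_prefix]
          refine ⟨l, ?_⟩
          have : pvNlW = pvW ++ ['\n'] := by rfl
          rw [this, hs]
          simp
        · have hlen : 7 ≤ t.length := by
            have := hs.length_le; simpa [pvW] using this
          have hst : pvW.isSuffixOf t = true := List.isSuffixOf_iff_suffix.mpr hs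
          have hsc : pvW.isSuffixOf (c :: t) = true := by
            rw [List.isSuffixOf_iff_suffix]
            exact hs.trans (List.suffix_cons c t)
          rw [if_pos hst, if_pos hsc]
          have : (c :: t).length - 7 = (t.length - 7) + 1 := by simp; omega
          rw [this, List.take_succ_cons]
          simp
      · have hst : pvW.isSuffixOf t = false := by
          by_contra hc
          rw [Bool.not_eq_false, List.isSuffixOf_iff_suffix] at hc
          exact absurd (List.isSuffixOf_iff_suffix.mpr (hc.trans (List.suffix_cons c t))) (by simp [hs])
        rw [if_neg (by simp [hst]), if_neg hs]
        simp

theorem pv_repEx_nlfree (new l : List Char) (h : '\n' ∉ l) : pvRepEx new l = l := by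
  induction l with
  | nil => simp [pvRepEx]
  | cons c t ih =>
    rw [pvRepEx, if_neg]
    · rw [ih (fun hm => h (List.mem_cons_of_mem c hm))]
    · intro hp
      rw [List.isPrefixOf_iff_prefix] at hp
      obtain ⟨r, hr⟩ := hp
      apply h
      rw [← hr]
      exact List.mem_append_left _ (by decide)

theorem pv_repEx_join (new : List Char) (pieces : List (List Char))
    (h : ∀ p ∈ pieces, '\n' ∉ p) :
    pvRepEx new (PySem.Chars.join ['\n'] pieces) = pvStage new pieces := by
  induction pieces with
  | nil => simp [PySem.Chars.join_nil, pvRepEx, pvStage]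
  | cons p t ih =>
    cases t with
    | nil =>
      rw [PySem.Chars.join_singleton]
      exact (pv_repEx_nlfree new p (h p List.mem_cons_self)).trans rfl
    | cons q r =>
      rw [PySem.Chars.join_cons_cons]
      have : p ++ ['\n'] ++ PySem.Chars.join ['\n'] (q :: r)
          = p ++ '\n' :: PySem.Chars.join ['\n'] (q :: r) := by simp
      rw [this, pv_repEx_piece new p _ (h p List.mem_cons_self)]
      rw [ih (fun a ha => h a (List.mem_cons_of_mem p ha))]
      rfl





theorem pv_set_append {α : Type} (pre t : List α) (a v : α) :
    (pre ++ a :: t).set pre.length v = pre ++ v :: t := by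
  induction pre with
  | nil => rfl
  | cons x r ih => simp [ih]

theorem pv_markA_fold (tagL : List Char) (l pre : List (List Char)) (b : Bool) :
    ((PySem.List.enumerate (l.zip l) (pre.length : Int)).foldl
      (fun (st : List (List Char) × Bool) iv =>
        let ptr := if PySem.Chars.startswith iv.2.1 (' ' :: '*' :: ' ' :: tagL) then true else st.2
        if PySem.Chars.startswith iv.2.1 [' ', '*', '/'] && ptr then
          (st.1.set iv.1.toNat (iv.2.2 ++ '\n' :: "export ".toList), false)
        else (st.1, ptr)) (pre ++ l, b)).1 = pre ++ pvMarkRec tagL l b := by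
  induction l generalizing pre b with
  | nil => simp [pvMarkRec]
  | cons a t ih =>
    rw [List.zip_cons_cons]
    rw [show PySem.List.enumerate ((a, a) :: t.zip t) (pre.length : Int)
        = ((pre.length : Int), (a, a)) :: PySem.List.enumerate (t.zip t) ((pre.length : Int) + 1) by
      simp [PySem.List.enumerate]]
    rw [List.foldl_cons]
    simp only []
    by_cases hcl : (PySem.Chars.startswith a [' ', '*', '/']
        && (if PySem.Chars.startswith a (' ' :: '*' :: ' ' :: tagL) then true else b)) = true
    · rw [if_pos hcl]
      have hset : (pre ++ a :: t).set ((pre.length : Int)).toNat (a ++ '\n' :: "export ".toList)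
          = pre ++ (a ++ '\n' :: "export ".toList) :: t := by
        rw [Int.toNat_natCast, pv_set_append]
      rw [hset]
      have hlen : ((pre.length : Int) + 1) = (((pre ++ [a ++ '\n' :: "export ".toList]).length : Nat) : Int) := by
        simp
      rw [hlen]
      have := ih (pre ++ [a ++ '\n' :: "export ".toList]) false
      rw [List.append_assoc] at this
      simp only [List.singleton_append] at this
      rw [this]
      simp only [pvMarkRec]
      rw [if_pos hcl]
      first | rfl | simp [pvW]
    · rw [if_neg hcl]
      have hlen : ((pre.length : Int) + 1) = (((pre ++ [a]).length : Nat) : Int) := by simp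
      rw [hlen]
      have := ih (pre ++ [a]) (if PySem.Chars.startswith a (' ' :: '*' :: ' ' :: tagL) then true else b)
      rw [List.append_assoc] at this
      simp only [List.singleton_append] at this
      rw [this]
      simp only [pvMarkRec]
      rw [if_neg hcl]
      simp

theorem pv_piecesB_fold (tagL : List Char) (ls : List (List Char)) (acc : List (List Char)) (b : Bool) :
    (ls.foldl
      (fun (pa : List (List Char) × Bool) line =>
        if line = [] then pa
        else if PySem.Chars.startswith line (' ' :: '*' :: ' ' :: tagL) then (pa.1, true)
        else if PySem.Chars.startswith line [' ', '*', '/'] && pa.2 then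
          (pa.1 ++ [line, "export ".toList], false)
        else (pa.1 ++ [line], pa.2)) (acc, b)).1
      = acc ++ pvPiecesRec tagL (ls.filter (fun l => !decide (l = []))) b := by
  induction ls generalizing acc b with
  | nil => simp [pvPiecesRec]
  | cons a t ih =>
    rw [List.foldl_cons]
    by_cases ha : a = []
    · subst ha
      rw [ih]
      simp [List.filter]
    · rw [List.filter_cons_of_pos (by simp [ha])]
      simp only [if_neg ha]
      by_cases h1 : PySem.Chars.startswith a (' ' :: '*' :: ' ' :: tagL) = true
      · rw [if_pos h1, ih, pvPiecesRec]
        rw [if_pos h1]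
      · rw [if_neg h1]
        by_cases h2 : (PySem.Chars.startswith a [' ', '*', '/'] && b) = true
        · rw [if_pos h2, ih, pvPiecesRec, if_neg h1, if_pos h2]
          simp [pvW]
        · rw [if_neg h2, ih, pvPiecesRec, if_neg h1, if_neg h2]
          simp

theorem pv_stageB_fold (exporter : Bool) (n : Nat) (suff : List (List Char)) (acc : List Char)
    (k : Nat) (hk : k + suff.length = n) :
    ((PySem.List.enumerate suff (k : Int)).foldl
      (fun res ip =>
        if ip.1 + 1 = (n : Int) then res ++ ip.2
        else if PySem.Chars.endswith ip.2 ("export ".toList) then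
          res ++ (if exporter then ip.2 else ip.2.take (ip.2.length - 7))
        else res ++ ip.2 ++ ['\n']) acc)
      = acc ++ pvStageB exporter suff := by
  induction suff generalizing k acc with
  | nil => simp [PySem.List.enumerate, pvStageB]
  | cons p t ih =>
    rw [show PySem.List.enumerate (p :: t) (k : Int)
        = ((k : Int), p) :: PySem.List.enumerate t ((k : Int) + 1) by
      simp [PySem.List.enumerate]]
    rw [List.foldl_cons]
    cases t with
    | nil =>
      have hlast : ((k : Int) + 1 = (n : Int)) := by simp at hk; omega
      simp only [if_pos hlast]
      simp [PySem.List.enumerate, pvStageB]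
    | cons q r =>
      have hnot : ¬ ((k : Int) + 1 = (n : Int)) := by simp at hk ⊢; omega
      rw [if_neg hnot]
      have hcast : ((k : Int) + 1) = (((k + 1 : Nat) : Nat) : Int) := by push_cast; ring
      rw [hcast]
      by_cases he : PySem.Chars.endswith p ("export ".toList) = true
      · rw [if_pos he, ih _ (k+1) (by simp at hk ⊢; omega)]
        rw [pvStageB]
        have hsfx : pvW.isSuffixOf p = PySem.Chars.endswith p ("export ".toList) := rfl
        rw [hsfx, if_pos he]
        simp
      · rw [if_neg he, ih _ (k+1) (by simp at hk ⊢; omega)]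
        rw [pvStageB]
        have hsfx : pvW.isSuffixOf p = PySem.Chars.endswith p ("export ".toList) := rfl
        rw [hsfx, if_neg he]
        simp


theorem pv_splitOn_go_not_mem (c : Char) (fuel : Nat) :
    ∀ (l cur : List Char) (acc : List (List Char)), l.length ≤ fuel →
      c ∉ cur → (∀ a ∈ acc, c ∉ a) →
      ∀ m ∈ PySem.Chars.splitOn.go [c] fuel l cur acc, c ∉ m := by
  induction fuel with
  | zero =>
    intro l cur acc h hcur hacc m hm
    have hl : l = [] := List.length_eq_zero_iff.mp (Nat.le_zero.mp h)
    subst hl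
    simp [PySem.Chars.splitOn.go] at hm
    rcases hm with hm | hm
    · exact hacc m hm
    · subst hm; simpa using hcur
  | succ n ih =>
    intro l cur acc h hcur hacc m hm
    cases l with
    | nil =>
      simp [PySem.Chars.splitOn.go] at hm
      rcases hm with hm | hm
      · exact hacc m hm
      · subst hm; simpa using hcur
    | cons a t =>
      rw [PySem.Chars.splitOn.go] at hm
      by_cases hc : ([c].isPrefixOf (a :: t)) = true
      · rw [if_pos hc] at hm
        refine ih _ _ _ (by simp at h ⊢; omega) (by simp) ?_ m hm
        intro x hx
        rcases List.mem_cons.1 hx with rfl | hx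
        · simpa using hcur
        · exact hacc x hx
      · rw [if_neg hc] at hm
        have hne : a ≠ c := by
          simp [List.isPrefixOf] at hc
          exact fun h => hc (h.symm ▸ rfl)
        refine ih _ _ _ (by simp at h ⊢; omega) ?_ hacc m hm
        intro hx
        rcases List.mem_cons.1 hx with rfl | hx
        · exact hne rfl
        · exact hcur hx

theorem pv_splitOn_single_not_mem (s : List Char) (c : Char) (l : List Char)
    (h : l ∈ PySem.Chars.splitOn s [c]) : c ∉ l := by
  rw [PySem.Chars.splitOn] at h
  exact pv_splitOn_go_not_mem c (s.length + 1) s [] [] (by omega) (by simp) (by simp) l h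

theorem pv_markA_fold0 (tagL : List Char) (l : List (List Char)) :
    ((PySem.List.enumerate (l.zip l)).foldl
      (fun (st : List (List Char) × Bool) iv =>
        let ptr := if PySem.Chars.startswith iv.2.1 (' ' :: '*' :: ' ' :: tagL) then true else st.2
        if PySem.Chars.startswith iv.2.1 [' ', '*', '/'] && ptr then
          (st.1.set iv.1.toNat (iv.2.2 ++ '\n' :: "export ".toList), false)
        else (st.1, ptr)) (l, false)).1 = pvMarkRec tagL l false := by
  have h := pv_markA_fold tagL l [] false
  simpa using h

theorem pv_stageB_fold0 (exporter : Bool) (pieces : List (List Char)) :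
    ((PySem.List.enumerate pieces).foldl
      (fun res ip =>
        if ip.1 + 1 = (pieces.length : Int) then res ++ ip.2
        else if PySem.Chars.endswith ip.2 ("export ".toList) then
          res ++ (if exporter then ip.2 else ip.2.take (ip.2.length - 7))
        else res ++ ip.2 ++ ['\n']) [])
      = pvStageB exporter pieces := by
  have h := pv_stageB_fold exporter pieces.length pieces [] 0 (by simp)
  simpa using h

theorem pv_block_eq (tag : String) (blk : List Char) :
    (let objL := (PySem.Chars.splitOn blk ['\n']).filter (fun l => !decide (l = []))
     let res0 := objL.map (fun l => l)
     let st := (PySem.List.enumerate (objL.zip res0)).foldl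
       (fun (st : List (List Char) × Bool) iv =>
         let ptr := if PySem.Chars.startswith iv.2.1 (' ' :: '*' :: ' ' :: tag.toList) then true else st.2
         if PySem.Chars.startswith iv.2.1 [' ', '*', '/'] && ptr then
           (st.1.set iv.1.toNat (iv.2.2 ++ '\n' :: "export ".toList), false)
         else (st.1, ptr)) (res0, false)
     let resJ := PySem.Chars.join ['\n']
       (st.1.filter (fun l => !PySem.Chars.startswith l (' ' :: '*' :: ' ' :: tag.toList)))
     if tag == "@exporter"
       then PySem.Chars.replace resJ ("export \n".toList) ("export ".toList)
       else PySem.Chars.replace resJ ("export \n".toList) [])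
    = (let pa := (PySem.Chars.splitOn blk ['\n']).foldl
         (fun (pa : List (List Char) × Bool) line =>
           if line = [] then pa
           else if PySem.Chars.startswith line (' ' :: '*' :: ' ' :: tag.toList) then (pa.1, true)
           else if PySem.Chars.startswith line [' ', '*', '/'] && pa.2 then
             (pa.1 ++ [line, "export ".toList], false)
           else (pa.1 ++ [line], pa.2)) ([], false)
       (PySem.List.enumerate pa.1).foldl
         (fun res ip =>
           if ip.1 + 1 = (pa.1.length : Int) then res ++ ip.2
           else if PySem.Chars.endswith ip.2 ("export ".toList) then
             res ++ (if tag == "@exporter" then ip.2 else ip.2.take (ip.2.length - 7))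
           else res ++ ip.2 ++ ['\n']) []) := by
  have hlines : ∀ p ∈ (PySem.Chars.splitOn blk ['\n']).filter (fun l => !decide (l = [])), '\n' ∉ p :=
    fun p hp => pv_splitOn_single_not_mem blk '\n' p (List.mem_of_mem_filter hp)
  have hpieces_nl : ∀ p ∈ pvPiecesRec tag.toList
      ((PySem.Chars.splitOn blk ['\n']).filter (fun l => !decide (l = []))) false, '\n' ∉ p := by
    intro p hp
    rcases pv_pieces_mem _ _ _ _ hp with h | h
    · exact hlines p h
    · subst h; decide
  dsimp only
  rw [List.map_id']
  rw [pv_markA_fold0, pv_filter_markRec]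
  rw [pv_piecesB_fold tag.toList _ [] false, List.nil_append, pv_stageB_fold0, pv_stageB_eq_stage]
  have hjoin : PySem.Chars.join ['\n']
        (pvCombineRec tag.toList ((PySem.Chars.splitOn blk ['\n']).filter (fun l => !decide (l = []))) false)
      = PySem.Chars.join ['\n']
        (pvPiecesRec tag.toList ((PySem.Chars.splitOn blk ['\n']).filter (fun l => !decide (l = []))) false) := by
    rw [pv_join_eq_drop_flatMap, pv_join_eq_drop_flatMap, pv_flatMap_combine_pieces]
  rw [hjoin]
  by_cases htag : (tag == "@exporter") = true
  · rw [if_pos htag, if_pos htag]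
    rw [show ("export \n".toList) = pvNlW from rfl, pv_replace_eq_repEx,
      pv_repEx_join _ _ hpieces_nl]
    try rfl
  · rw [if_neg htag, if_neg htag]
    rw [show ("export \n".toList) = pvNlW from rfl, pv_replace_eq_repEx,
      pv_repEx_join _ _ hpieces_nl]
    try rfl

-- ===== VERDICT (by name: the statement is the Claim_ definition above) =====
theorem get_export_objects_py_spec : Claim_equal_get_export_objects_py := by
  intro x tag _
  unfold Spec_get_export_objects_py get_export_objects_py get_export_objects_py_alt
  dsimp only
  rw [PySem.List.foldl_append_if, PySem.List.foldl_append_singleton_eq_map,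
    List.nil_append, List.nil_append]
  refine List.map_congr_left ?_
  intro b _
  exact congrArg String.ofList (pv_block_eq tag b)
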